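-- pv_equiv track=rewrite | github.com/michalgregor/hiddenlayer | hiddenlayer/transforms.py | update_caption_dict
-- ===== SOURCE A (Python) =====
-- def update_caption_dict(caption_dict1, caption_dict2):
--     caption_dict = caption_dict1.copy()
--
--     for k, v in caption_dict2.items():
--         try:
--             caption_dict[k] = None if caption_dict[k] != v else v
--         except KeyError:
--             caption_dict[k] = None
--
--     for k, v in caption_dict1.items():
--         if not k in caption_dict2:
--             caption_dict[k] = None
--
--     return caption_dict
-- ===== SOURCE B (Python) =====
-- def update_caption_dict(caption_dict1, caption_dict2):
--     # keys on which the two dicts agree, found at once by set intersection of the item pairs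
--     agreed = dict(caption_dict1.items() & caption_dict2.items())
--     # every other key of the union maps to None
--     return {k: agreed.get(k) for k in {**caption_dict1, **caption_dict2}}
-- ===== Notes on version B (the rewrite author's own statement) =====
-- stated objective: simpler
-- what changed: A copies dict1 and mutates it in two complementary passes (a dict2 walk with try/except KeyError, then a dict1 walk nulling dict2-missing keys); B computes the agreeing keys in one shot as the SET INTERSECTION of the item pairs, dict1.items() & dict2.items(), and then builds the result as a comprehension over the merged key order {**d1,**d2} reading agreed.get(k) (None by default); Pre_ only requires distinct keys, which every real Python dict argument has.
import Mathlib
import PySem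

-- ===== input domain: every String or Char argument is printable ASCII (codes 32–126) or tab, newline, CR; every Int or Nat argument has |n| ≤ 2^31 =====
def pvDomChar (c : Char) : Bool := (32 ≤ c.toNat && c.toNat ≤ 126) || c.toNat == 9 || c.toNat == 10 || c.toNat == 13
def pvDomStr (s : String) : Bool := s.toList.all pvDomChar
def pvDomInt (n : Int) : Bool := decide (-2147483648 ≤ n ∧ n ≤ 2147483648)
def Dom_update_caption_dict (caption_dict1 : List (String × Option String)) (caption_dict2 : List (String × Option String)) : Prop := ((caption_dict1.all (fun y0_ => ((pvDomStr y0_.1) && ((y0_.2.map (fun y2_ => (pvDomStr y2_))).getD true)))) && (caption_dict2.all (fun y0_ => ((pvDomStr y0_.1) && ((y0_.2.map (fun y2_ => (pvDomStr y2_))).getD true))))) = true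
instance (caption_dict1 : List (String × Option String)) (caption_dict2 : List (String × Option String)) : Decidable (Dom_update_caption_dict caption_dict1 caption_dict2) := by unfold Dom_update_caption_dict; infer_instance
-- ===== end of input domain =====

-- B finds the agreeing keys at once by SET INTERSECTION of the item pairs and reads everything
-- else off with agreed.get, replacing A's copy-then-two-mutating-passes; simpler, not faster.

-- ===== PORT A =====
def update_caption_dict (caption_dict1 : List (String × Option String)) (caption_dict2 : List (String × Option String)) : List (String × Option String) :=
  -- caption_dict = caption_dict1.copy()
  let cd0 : PySem.Dict String (Option String) := PySem.Dict.mk caption_dict1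
  let d2 : PySem.Dict String (Option String) := PySem.Dict.mk caption_dict2
  -- first loop: try caption_dict[k]; KeyError ↔ get? = none
  let cd1 := caption_dict2.foldl (fun cd kv =>
    match cd.get? kv.1 with
    | some cur => cd.insert kv.1 (if cur ≠ kv.2 then none else kv.2)
    | none => cd.insert kv.1 none) cd0
  -- second loop: null the keys of caption_dict1 missing from caption_dict2
  let cd2 := caption_dict1.foldl (fun cd kv =>
    if d2.contains kv.1 then cd else cd.insert kv.1 none) cd1
  cd2.items

-- ===== PORT B =====
def update_caption_dict_alt (caption_dict1 : List (String × Option String)) (caption_dict2 : List (String × Option String)) : List (String × Option String) :=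
  -- agreed = dict(caption_dict1.items() & caption_dict2.items()); Python's iteration order
  -- over the set is unspecified and the dict built from it is ONLY looked up afterwards,
  -- so Set.inter's representative order is exact here
  let agreed : PySem.Dict String (Option String) :=
    PySem.Dict.mk (PySem.Set.inter (PySem.Set.ofList caption_dict1) (PySem.Set.ofList caption_dict2))
  -- {**caption_dict1, **caption_dict2}
  let merged := caption_dict2.foldl (fun m kv => m.insert kv.1 kv.2) (PySem.Dict.mk caption_dict1)
  -- {k: agreed.get(k) for k in merged}
  (merged.keys.foldl (fun res k => res.insert k (agreed.getD k none)) PySem.Dict.empty).items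

-- ===== PRECONDITION & SPEC =====
-- The association lists stand for Python dicts, whose keys are necessarily distinct; a
-- duplicate-key list encodes no Python input (A can never be called on one), so Pre_
-- excludes nothing that the Python A returns on.
def Pre_update_caption_dict (caption_dict1 : List (String × Option String)) (caption_dict2 : List (String × Option String)) : Prop :=
  (caption_dict1.map Prod.fst).Nodup ∧ (caption_dict2.map Prod.fst).Nodup
instance (caption_dict1 : List (String × Option String)) (caption_dict2 : List (String × Option String)) : Decidable (Pre_update_caption_dict caption_dict1 caption_dict2) := by unfold Pre_update_caption_dict; infer_instance

def pvWitness_update_caption_dict : (List (String × Option String)) × (List (String × Option String)) :=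
  ([("a", some "x"), ("b", none)], [("a", some "y"), ("c", none)])

def Spec_update_caption_dict (caption_dict1 : List (String × Option String)) (caption_dict2 : List (String × Option String)) (out : List (String × Option String)) : Prop := out = update_caption_dict_alt caption_dict1 caption_dict2
instance (caption_dict1 : List (String × Option String)) (caption_dict2 : List (String × Option String)) (out : List (String × Option String)) : Decidable (Spec_update_caption_dict caption_dict1 caption_dict2 out) := by unfold Spec_update_caption_dict; infer_instance

-- ===== CLAIM (what is proved, stated in full; the proofs are below) =====
def Claim_equal_update_caption_dict : Prop := ∀ (caption_dict1 : List (String × Option String)) (caption_dict2 : List (String × Option String)), Dom_update_caption_dict caption_dict1 caption_dict2 → Pre_update_caption_dict caption_dict1 caption_dict2 → Spec_update_caption_dict caption_dict1 caption_dict2 (update_caption_dict caption_dict1 caption_dict2)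

-- ===== LEMMAS AND PROOFS =====

-- A's first-loop update of the stored value, as a function of the looked-up value
def gval (o : Option (Option String)) (v : Option String) : Option String :=
  match o with
  | some cur => if cur ≠ v then none else v
  | none => none

lemma stepA_eq : (fun (cd : PySem.Dict String (Option String)) (kv : String × Option String) =>
    match cd.get? kv.1 with
    | some cur => cd.insert kv.1 (if cur ≠ kv.2 then none else kv.2)
    | none => cd.insert kv.1 none)
    = fun cd kv => cd.insert kv.1 (gval (cd.get? kv.1) kv.2) := by
  funext cd kv
  cases h : cd.get? kv.1 <;> simp [gval]

lemma phase1_get? (l : List (String × Option String)) (cd : PySem.Dict String (Option String))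
    (k : String) (hn : (l.map Prod.fst).Nodup) :
    (l.foldl (fun cd kv => cd.insert kv.1 (gval (cd.get? kv.1) kv.2)) cd).get? k =
      match (PySem.Dict.mk l).get? k with
      | some v => some (gval (cd.get? k) v)
      | none => cd.get? k := by
  induction l generalizing cd with
  | nil => simp [PySem.Dict.get?]
  | cons kv rest ih =>
    simp only [List.map_cons, List.nodup_cons] at hn
    simp only [List.foldl_cons]
    rw [ih _ hn.2, PySem.Dict.get?_mk_cons]
    by_cases hk : k = kv.1
    · have hrest : (PySem.Dict.mk rest).get? kv.1 = none := by
        rw [PySem.Dict.get?_eq_none_iff_not_mem_keys]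
        simpa using hn.1
      rw [hk, hrest]
      simp [PySem.Dict.get?_insert_self]
    · have hne : (kv.1 == k) = false := beq_eq_false_iff_ne.mpr (Ne.symm hk)
      simp only [hne, Bool.false_eq_true, if_false]
      rw [PySem.Dict.get?_insert_of_ne _ _ hk]

lemma phase2_get? (d2 : PySem.Dict String (Option String))
    (l : List (String × Option String)) (cd : PySem.Dict String (Option String)) (k : String) :
    (l.foldl (fun cd kv => if d2.contains kv.1 then cd else cd.insert kv.1 none) cd).get? k =
      if k ∈ l.map Prod.fst ∧ d2.contains k = false then some none else cd.get? k := by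
  induction l generalizing cd with
  | nil => simp
  | cons kv rest ih =>
    simp only [List.foldl_cons]
    rw [ih]
    by_cases hc : d2.contains k = true
    · have hPr : ¬ (k ∈ rest.map Prod.fst ∧ d2.contains k = false) := by simp [hc]
      have hPc : ¬ (k ∈ (kv :: rest).map Prod.fst ∧ d2.contains k = false) := by simp [hc]
      rw [if_neg hPr, if_neg hPc]
      by_cases hck : d2.contains kv.1 = true
      · rw [if_pos hck]
      · rw [if_neg hck]
        by_cases hk : k = kv.1
        · rw [hk] at hc; exact absurd hc hck
        · exact PySem.Dict.get?_insert_of_ne _ _ hk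
    · have hc' : d2.contains k = false := by simpa using hc
      by_cases hk1 : k ∈ rest.map Prod.fst
      · have hPr : k ∈ rest.map Prod.fst ∧ d2.contains k = false := ⟨hk1, hc'⟩
        have hPc : k ∈ (kv :: rest).map Prod.fst ∧ d2.contains k = false :=
          ⟨by simp [hk1], hc'⟩
        rw [if_pos hPr, if_pos hPc]
      · have hPr : ¬ (k ∈ rest.map Prod.fst ∧ d2.contains k = false) := fun h => hk1 h.1
        rw [if_neg hPr]
        by_cases hk : k = kv.1
        · have hPc : k ∈ (kv :: rest).map Prod.fst ∧ d2.contains k = false :=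
            ⟨by simp [hk], hc'⟩
          rw [if_pos hPc]
          have hck : d2.contains kv.1 = false := hk ▸ hc'
          rw [if_neg (by simp [hck]), hk]
          simp [PySem.Dict.get?_insert_self]
        · have hPc : ¬ (k ∈ (kv :: rest).map Prod.fst ∧ d2.contains k = false) := by
            rintro ⟨h1, _⟩
            rcases (by simpa using h1 : k = kv.1 ∨ k ∈ rest.map Prod.fst) with h | h
            · exact hk h
            · exact hk1 h
          rw [if_neg hPc]
          by_cases hck : d2.contains kv.1 = true
          · rw [if_pos hck]
          · rw [if_neg hck]
            exact PySem.Dict.get?_insert_of_ne _ _ hk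

lemma phase2_keys (d2 : PySem.Dict String (Option String))
    (l : List (String × Option String)) (cd : PySem.Dict String (Option String))
    (h : ∀ kv ∈ l, cd.contains kv.1 = true) :
    (l.foldl (fun cd kv => if d2.contains kv.1 then cd else cd.insert kv.1 none) cd).keys = cd.keys := by
  induction l generalizing cd with
  | nil => simp
  | cons kv rest ih =>
    simp only [List.foldl_cons]
    by_cases hc : d2.contains kv.1
    · simp only [hc, if_true]
      exact ih cd (fun x hx => h x (List.mem_cons_of_mem _ hx))
    · simp only [hc, Bool.false_eq_true, if_false]
      have hkeys : (cd.insert kv.1 none).keys = cd.keys :=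
        PySem.Dict.keys_insert_of_contains _ _ (h kv List.mem_cons_self)
      rw [ih _ (fun x hx => by
        rw [PySem.Dict.contains_iff_mem_keys, hkeys, ← PySem.Dict.contains_iff_mem_keys]
        exact h x (List.mem_cons_of_mem _ hx)), hkeys]

theorem update_caption_dict_spec : Claim_equal_update_caption_dict := by
  intro c1 c2 _ hpre
  obtain ⟨hn1, hn2⟩ := hpre
  unfold Spec_update_caption_dict update_caption_dict update_caption_dict_alt
  simp only [stepA_eq]
  set D1 : PySem.Dict String (Option String) := PySem.Dict.mk c1 with hD1
  set D2 : PySem.Dict String (Option String) := PySem.Dict.mk c2 with hD2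
  have hD1keys : D1.keys = c1.map Prod.fst := by simp [hD1, PySem.Dict.keys]
  have hD2keys : D2.keys = c2.map Prod.fst := by simp [hD2, PySem.Dict.keys]
  -- pair-membership characterisation of the two source dicts (keys are Nodup)
  have hD1mem : ∀ k v, D1.get? k = some v ↔ (k, v) ∈ c1 := fun k v =>
    PySem.Dict.get?_eq_some_iff_mem_items D1 k v (by rw [hD1keys]; exact hn1)
  have hD2mem : ∀ k v, D2.get? k = some v ↔ (k, v) ∈ c2 := fun k v =>
    PySem.Dict.get?_eq_some_iff_mem_items D2 k v (by rw [hD2keys]; exact hn2)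
  -- the intersection list underlying `agreed`
  have hc1nodup : c1.Nodup := hn1.of_map
  have hc2nodup : c2.Nodup := hn2.of_map
  set inter := PySem.Set.inter (PySem.Set.ofList c1) (PySem.Set.ofList c2) with hinter
  have hinter_sub : inter.Sublist c1 := by
    rw [hinter, PySem.Set.ofList_eq_self_of_nodup c1 hc1nodup]
    exact List.filter_sublist
  have hinter_keys_nodup : (inter.map Prod.fst).Nodup :=
    hn1.sublist (hinter_sub.map Prod.fst)
  have hinter_mem : ∀ p, p ∈ inter ↔ p ∈ c1 ∧ p ∈ c2 := by
    intro p
    rw [hinter, PySem.Set.mem_inter, PySem.Set.mem_ofList, PySem.Set.mem_ofList]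
  set agreed : PySem.Dict String (Option String) := PySem.Dict.mk inter with hagreed
  have hagmem : ∀ k v, agreed.get? k = some v ↔ (k, v) ∈ c1 ∧ (k, v) ∈ c2 := by
    intro k v
    rw [hagreed, PySem.Dict.get?_eq_some_iff_mem_items _ k v
      (by simpa [PySem.Dict.keys] using hinter_keys_nodup)]
    exact hinter_mem (k, v)
  set cd1 := c2.foldl (fun cd kv => cd.insert kv.1 (gval (cd.get? kv.1) kv.2)) D1 with hcd1
  set cd2 := c1.foldl (fun cd kv => if D2.contains kv.1 then cd else cd.insert kv.1 none) cd1 with hcd2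
  set merged := c2.foldl (fun m kv => m.insert kv.1 kv.2) D1 with hmerged
  -- key lists
  have hcd1keys : cd1.keys = PySem.Set.update D1.keys (c2.map Prod.fst) := by
    rw [hcd1]; exact PySem.Dict.keys_foldl_insert_key c2 Prod.fst _ D1
  have hmergedkeys : merged.keys = PySem.Set.update D1.keys (c2.map Prod.fst) := by
    rw [hmerged]; exact PySem.Dict.keys_foldl_insert_key c2 Prod.fst _ D1
  have hmem_merged : ∀ k, k ∈ merged.keys ↔ k ∈ c1.map Prod.fst ∨ k ∈ c2.map Prod.fst := by
    intro k
    rw [hmergedkeys, PySem.Set.mem_update, hD1keys]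
  have hcd1nodup : cd1.keys.Nodup := by
    rw [hcd1]
    exact PySem.Dict.nodup_keys_foldl_insert_key c2 Prod.fst _ D1 (by rw [hD1keys]; exact hn1)
  have hcd2keys : cd2.keys = cd1.keys := by
    rw [hcd2]
    exact phase2_keys D2 c1 cd1 (fun kv hkv => by
      rw [PySem.Dict.contains_iff_mem_keys, hcd1keys, PySem.Set.mem_update, hD1keys]
      exact Or.inl (List.mem_map_of_mem hkv))
  have hcd2nodup : cd2.keys.Nodup := hcd2keys ▸ hcd1nodup
  -- pointwise values: A's finished dict agrees with agreed.get(k) on every merged key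
  have hval : ∀ k ∈ merged.keys, cd2.getD k none = agreed.getD k none := by
    intro k hk
    have hget : cd2.get? k =
        if k ∈ c1.map Prod.fst ∧ D2.contains k = false then some none else cd1.get? k := by
      rw [hcd2]; exact phase2_get? D2 c1 cd1 k
    have hget1 : cd1.get? k =
        match D2.get? k with
        | some v => some (gval (D1.get? k) v)
        | none => D1.get? k := by
      have h' := phase1_get? c2 D1 k hn2
      rw [← hD2] at h'
      exact h'
    rw [PySem.Dict.getD_eq_get?_getD, PySem.Dict.getD_eq_get?_getD, hget]
    cases h2 : D2.get? k with
    | some v =>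
      have hc : D2.contains k = true := by
        rw [PySem.Dict.contains_eq_isSome_get?, h2]; rfl
      rw [if_neg (by simp [hc]), hget1]
      cases h1 : D1.get? k with
      | some a =>
        by_cases hav : a = v
        · subst hav
          have hag : agreed.get? k = some a :=
            (hagmem k a).mpr ⟨(hD1mem k a).mp h1, (hD2mem k a).mp h2⟩
          simp [h2, gval, hag]
        · have hag : agreed.get? k = none := by
            cases hag' : agreed.get? k with
            | none => rfl
            | some w =>
              obtain ⟨hw1, hw2⟩ := (hagmem k w).mp hag'
              have := ((hD1mem k w).mpr hw1).symm.trans h1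
              have hwv := ((hD2mem k w).mpr hw2).symm.trans h2
              simp only [Option.some.injEq] at this hwv
              exact absurd (this ▸ hwv) hav
          simp [h2, gval, hav, hag]
      | none =>
        have hag : agreed.get? k = none := by
          cases hag' : agreed.get? k with
          | none => rfl
          | some w =>
            obtain ⟨hw1, _⟩ := (hagmem k w).mp hag'
            rw [(hD1mem k w).mpr hw1] at h1; exact absurd h1 (by simp)
        simp [h2, gval, hag]
    | none =>
      have hc : D2.contains k = false := by
        rw [PySem.Dict.contains_eq_isSome_get?, h2]; rfl
      have hk1 : k ∈ c1.map Prod.fst := by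
        rcases (hmem_merged k).mp hk with h | h
        · exact h
        · exfalso
          rw [PySem.Dict.get?_eq_none_iff_not_mem_keys, hD2keys] at h2
          exact h2 h
      have hag : agreed.get? k = none := by
        cases hag' : agreed.get? k with
        | none => rfl
        | some w =>
          obtain ⟨_, hw2⟩ := (hagmem k w).mp hag'
          rw [(hD2mem k w).mpr hw2] at h2; exact absurd h2 (by simp)
      rw [if_pos ⟨hk1, hc⟩, hag]
      rfl
  -- assemble
  have hA : cd2.items = cd2.keys.map (fun k => (k, cd2.getD k none)) :=
    PySem.Dict.items_eq_map_keys cd2 hcd2nodup none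
  have hB : (merged.keys.foldl (fun res k => res.insert k (agreed.getD k none))
      PySem.Dict.empty).items = merged.keys.map (fun k => (k, agreed.getD k none)) := by
    have hfresh := PySem.Dict.items_foldl_insert_fresh (l := merged.keys)
      (k := fun x => x) (v := fun x => agreed.getD x none) (d := PySem.Dict.empty)
      (fun a _ => PySem.Dict.contains_empty a)
      (by
        have hid : List.map (fun x => x) merged.keys = merged.keys := by simp
        rw [hid, hmergedkeys]
        exact PySem.Set.nodup_update _ _ (by rw [hD1keys]; exact hn1))
    simpa using hfresh
  rw [hA, hB, hcd2keys, hcd1keys, ← hmergedkeys]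
  exact (List.map_congr_left (fun k hk => by rw [hval k hk]))
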